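-- pv_equiv track=rewrite | github.com/pypi-data/pypi-mirror-226 | packages/modelbit/modelbit-0.26.6-py3-none-any.whl/modelbit/environment.py | systemPackagesForPips
-- ===== SOURCE A (Python) =====
-- from typing import List, Tuple, Dict, Optional, Set
--
-- def systemPackagesForPips(pipPackages: Optional[List[str]],
--                           userSysPackages: Optional[List[str]]) -> Optional[List[str]]:
--   systemPackages: Set[str] = set(userSysPackages or [])
--   if pipPackages is None:
--     return None
--   # Add to this list as we find more dependencies that packages need
--   lookups: Dict[str, List[str]] = {
--       "fasttext": ["build-essential"],
--       "osqp": ["cmake", "build-essential"],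
--       "psycopg2": ["libpq5", "libpq-dev"],
--       "opencv-python": ["python3-opencv"],
--       "opencv-python-headless": ["python3-opencv"],
--       "opencv-contrib-python": ["python3-opencv"],
--       "xgboost": ["libgomp1"],
--       "lightgbm": ["libgomp1"],
--       "groundingdino-py": ["build-essential"],
--   }
--   for pipPackage in pipPackages:
--     name = pipPackage.split("=")[0].lower()
--     for sysPkg in lookups.get(name, []):
--       systemPackages.add(sysPkg)
--     if pipPackage.startswith("git+"):
--       systemPackages.add("git")
--
--   if (len(systemPackages)) == 0:
--     return None
--   return sorted(list(systemPackages))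
-- ===== SOURCE B (Python) =====
-- from typing import List, Optional
--
-- # B: no set at all -- gather candidates (with duplicates) into a plain list by
-- # scanning the fixed lookup table against the list of normalized names, then
-- # sort the list and drop adjacent duplicates in one pass; 'result or None' at the end.
-- def systemPackagesForPips(pipPackages: Optional[List[str]],
--                           userSysPackages: Optional[List[str]]) -> Optional[List[str]]:
--   if pipPackages is None:
--     return None
--   lookups = [
--       ("fasttext", ["build-essential"]),
--       ("osqp", ["cmake", "build-essential"]),
--       ("psycopg2", ["libpq5", "libpq-dev"]),
--       ("opencv-python", ["python3-opencv"]),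
--       ("opencv-python-headless", ["python3-opencv"]),
--       ("opencv-contrib-python", ["python3-opencv"]),
--       ("xgboost", ["libgomp1"]),
--       ("lightgbm", ["libgomp1"]),
--       ("groundingdino-py", ["build-essential"]),
--   ]
--   names = [p.split("=")[0].lower() for p in pipPackages]
--   cand = list(userSysPackages or [])
--   for key, vals in lookups:
--     if key in names:
--       cand = cand + vals
--   if any(p.startswith("git+") for p in pipPackages):
--     cand = cand + ["git"]
--   cand = sorted(cand)
--   result = []
--   prev = None
--   for x in cand:
--     if x != prev:
--       result.append(x)
--       prev = x
--   return result or None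
-- ===== Notes on version B (the rewrite author's own statement) =====
-- stated objective: alternative
-- what changed: B replaces A's set-and-dict accumulation with plain lists: it collects all candidate system packages (with duplicates) by scanning the fixed lookup table against the list of normalized pip names, then sorts the candidate list and removes adjacent duplicates in a single pass, instead of A's per-package dict lookups into a mutable set that is sorted at the end.
import Mathlib
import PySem

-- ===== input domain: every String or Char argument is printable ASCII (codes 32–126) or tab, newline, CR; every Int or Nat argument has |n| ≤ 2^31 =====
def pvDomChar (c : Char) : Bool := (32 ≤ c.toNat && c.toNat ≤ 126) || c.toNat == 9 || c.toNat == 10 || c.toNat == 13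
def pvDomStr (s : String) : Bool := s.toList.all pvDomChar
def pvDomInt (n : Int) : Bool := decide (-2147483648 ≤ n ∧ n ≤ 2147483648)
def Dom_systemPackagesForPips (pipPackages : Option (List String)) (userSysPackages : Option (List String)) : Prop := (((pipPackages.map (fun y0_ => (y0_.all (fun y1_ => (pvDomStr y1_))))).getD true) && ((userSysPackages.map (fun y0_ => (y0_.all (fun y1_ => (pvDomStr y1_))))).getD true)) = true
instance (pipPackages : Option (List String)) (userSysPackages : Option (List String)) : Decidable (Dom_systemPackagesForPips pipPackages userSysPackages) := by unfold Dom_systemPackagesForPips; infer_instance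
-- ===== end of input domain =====

-- B drops the set/dict machinery: it gathers candidates into a plain list by scanning
-- the fixed lookup table against the normalized-name list, then sorts and removes
-- adjacent duplicates in one pass; objective: alternative decomposition, same result.

-- pipPackage.split("=")[0].lower()  (split never returns [], so headD "" is exact)
def pvNorm (p : String) : String := PySem.Str.lower (((PySem.Str.split? p "=").getD []).headD "")

-- ===== PORT A =====
def pvLookups : PySem.Dict String (List String) :=
  PySem.Dict.ofList [
    ("fasttext", ["build-essential"]),
    ("osqp", ["cmake", "build-essential"]),
    ("psycopg2", ["libpq5", "libpq-dev"]),
    ("opencv-python", ["python3-opencv"]),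
    ("opencv-python-headless", ["python3-opencv"]),
    ("opencv-contrib-python", ["python3-opencv"]),
    ("xgboost", ["libgomp1"]),
    ("lightgbm", ["libgomp1"]),
    ("groundingdino-py", ["build-essential"])]

def systemPackagesForPips (pipPackages : Option (List String)) (userSysPackages : Option (List String)) : Option (List String) :=
  let systemPackages : PySem.Set String := PySem.Set.ofList (userSysPackages.getD [])
  match pipPackages with
  | none => none
  | some pips =>
    let s := pips.foldl (fun s pipPackage =>
        let s := PySem.Set.update s (pvLookups.getD (pvNorm pipPackage) [])
        if PySem.Str.startswith pipPackage "git+" then PySem.Set.add s "git" else s)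
      systemPackages
    if PySem.Set.len s = 0 then none else some (PySem.List.sorted s (fun x => x) false)

-- ===== PORT B =====
def pvTable : List (String × List String) := [
    ("fasttext", ["build-essential"]),
    ("osqp", ["cmake", "build-essential"]),
    ("psycopg2", ["libpq5", "libpq-dev"]),
    ("opencv-python", ["python3-opencv"]),
    ("opencv-python-headless", ["python3-opencv"]),
    ("opencv-contrib-python", ["python3-opencv"]),
    ("xgboost", ["libgomp1"]),
    ("lightgbm", ["libgomp1"]),
    ("groundingdino-py", ["build-essential"])]

def systemPackagesForPips_alt (pipPackages : Option (List String)) (userSysPackages : Option (List String)) : Option (List String) :=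
  match pipPackages with
  | none => none
  | some pips =>
    let names : List String := pips.map (fun p => pvNorm p)
    let cand0 : List String := userSysPackages.getD []
    let cand1 := pvTable.foldl (fun cand kv => if kv.1 ∈ names then cand ++ kv.2 else cand) cand0
    let cand2 := if pips.any (fun p => PySem.Str.startswith p "git+") then cand1 ++ ["git"] else cand1
    let candS := PySem.List.sorted cand2 (fun x => x) false
    -- the adjacent-duplicate loop: state (result, prev), prev starts as None
    let st := candS.foldl (fun (st : List String × Option String) x =>
        if some x ≠ st.2 then (st.1 ++ [x], some x) else st) (([] : List String), (none : Option String))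
    if st.1 = [] then none else some st.1

-- ===== PRECONDITION & SPEC =====
def Spec_systemPackagesForPips (pipPackages : Option (List String)) (userSysPackages : Option (List String)) (out : Option (List String)) : Prop := out = systemPackagesForPips_alt pipPackages userSysPackages
instance (pipPackages : Option (List String)) (userSysPackages : Option (List String)) (out : Option (List String)) : Decidable (Spec_systemPackagesForPips pipPackages userSysPackages out) := by unfold Spec_systemPackagesForPips; infer_instance

-- ===== CLAIM =====
def Claim_equal_systemPackagesForPips : Prop := ∀ (pipPackages : Option (List String)) (userSysPackages : Option (List String)), Dom_systemPackagesForPips pipPackages userSysPackages → Spec_systemPackagesForPips pipPackages userSysPackages (systemPackagesForPips pipPackages userSysPackages)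

-- ===== LEMMAS AND PROOFS =====

-- recursive description of B's adjacent-duplicate loop
def pvDedup : List String → Option String → List String
  | [], _ => []
  | x :: t, prev => if some x ≠ prev then x :: pvDedup t (some x) else pvDedup t prev

theorem pvFold_eq_dedup (xs res : List String) (prev : Option String) :
    (xs.foldl (fun (st : List String × Option String) x =>
        if some x ≠ st.2 then (st.1 ++ [x], some x) else st) (res, prev)).1
      = res ++ pvDedup xs prev := by
  induction xs generalizing res prev with
  | nil => simp [pvDedup]
  | cons x t ih =>
    simp only [List.foldl_cons, pvDedup]
    split_ifs with h
    · rw [ih]; simp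
    · rw [ih]

theorem mem_pvDedup (xs : List String) (prev : Option String) (x : String)
    (hs : xs.Pairwise (· ≤ ·)) (hlb : ∀ y ∈ xs, ∀ p, prev = some p → p ≤ y) :
    x ∈ pvDedup xs prev ↔ x ∈ xs ∧ some x ≠ prev := by
  induction xs generalizing prev with
  | nil => simp [pvDedup]
  | cons h t ih =>
    rcases List.pairwise_cons.mp hs with ⟨hht, ht⟩
    simp only [pvDedup]
    split_ifs with hcond
    · have iht := ih (some h) ht (fun y hy p hp => by
        obtain rfl : h = p := Option.some.inj hp; exact hht y hy)
      simp only [List.mem_cons, iht]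
      constructor
      · rintro (rfl | ⟨hxt, hxh⟩)
        · exact ⟨Or.inl rfl, hcond⟩
        · refine ⟨Or.inr hxt, ?_⟩
          rintro rfl
          -- x = prev's value: prev ≤ h ≤ x with x = that value forces h = x, contra hcond
          have hpx : x ≤ h := hlb h (List.mem_cons_self ..) x rfl
          have hhx : h ≤ x := hht x hxt
          have : h = x := le_antisymm hhx hpx
          exact hcond (by simp [this])
      · rintro ⟨(rfl | hxt), hne⟩
        · exact Or.inl rfl
        · by_cases hxh : x = h
          · exact Or.inl hxh
          · exact Or.inr ⟨hxt, by simpa using hxh⟩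
    · -- skip: prev = some h
      rw [not_not] at hcond
      have iht := ih prev ht (fun y hy p hp => by
        obtain rfl : h = p := Option.some.inj (hcond.trans hp); exact hht y hy)
      rw [iht]
      simp only [List.mem_cons]
      constructor
      · rintro ⟨hxt, hne⟩; exact ⟨Or.inr hxt, hne⟩
      · rintro ⟨(rfl | hxt), hne⟩
        · exact (hne hcond).elim
        · exact ⟨hxt, hne⟩

theorem pvDedup_pairwise (xs : List String) (prev : Option String)
    (hs : xs.Pairwise (· ≤ ·)) (hlb : ∀ y ∈ xs, ∀ p, prev = some p → p ≤ y) :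
    (pvDedup xs prev).Pairwise (· < ·) ∧ ∀ y ∈ pvDedup xs prev, ∀ p, prev = some p → p < y := by
  induction xs generalizing prev with
  | nil => simp [pvDedup]
  | cons h t ih =>
    rcases List.pairwise_cons.mp hs with ⟨hht, ht⟩
    simp only [pvDedup]
    split_ifs with hcond
    · have iht := ih (some h) ht (fun y hy p hp => by
        obtain rfl : h = p := Option.some.inj hp; exact hht y hy)
      constructor
      · exact List.pairwise_cons.mpr ⟨fun y hy => iht.2 y hy h rfl, iht.1⟩
      · intro y hy p hp
        have hph : p < h := by
          subst hp
          have hle : p ≤ h := hlb h (List.mem_cons_self ..) p rfl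
          have hne : h ≠ p := by intro he; exact hcond (by simp [he])
          exact lt_of_le_of_ne hle (fun he => hne he.symm)
        rcases List.mem_cons.mp hy with rfl | hy'
        · exact hph
        · exact lt_trans hph (iht.2 y hy' h rfl)
    · rw [not_not] at hcond
      exact ih prev ht (fun y hy p hp => by
        obtain rfl : h = p := Option.some.inj (hcond.trans hp); exact hht y hy)

-- membership in A's package loop
theorem pvA_fold_mem (pips : List String) (s : PySem.Set String) (x : String) :
    x ∈ pips.foldl (fun s pipPackage =>
        let s := PySem.Set.update s (pvLookups.getD (pvNorm pipPackage) [])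
        if PySem.Str.startswith pipPackage "git+" then PySem.Set.add s "git" else s) s ↔
      x ∈ s ∨ ∃ p ∈ pips, x ∈ pvLookups.getD (pvNorm p) [] ∨
        (PySem.Str.startswith p "git+" = true ∧ x = "git") := by
  induction pips generalizing s with
  | nil => simp
  | cons p ps ih =>
    simp only [List.foldl_cons, ih]
    split_ifs with h <;>
      simp only [PySem.Set.mem_add, PySem.Set.mem_update, List.mem_cons] <;> aesop

theorem pvA_fold_nodup (pips : List String) (s : PySem.Set String) (hs : s.Nodup) :
    (pips.foldl (fun s pipPackage =>
        let s := PySem.Set.update s (pvLookups.getD (pvNorm pipPackage) [])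
        if PySem.Str.startswith pipPackage "git+" then PySem.Set.add s "git" else s) s).Nodup := by
  induction pips generalizing s with
  | nil => exact hs
  | cons p ps ih =>
    simp only [List.foldl_cons]
    apply ih
    split_ifs with h
    · exact PySem.Set.nodup_add _ _ (PySem.Set.nodup_update _ _ hs)
    · exact PySem.Set.nodup_update _ _ hs

-- membership in B's table loop (plain list append)
theorem pvB_fold_mem (l : List (String × List String)) (names : List String)
    (c : List String) (x : String) :
    x ∈ l.foldl (fun cand kv => if kv.1 ∈ names then cand ++ kv.2 else cand) c ↔
      x ∈ c ∨ ∃ kv ∈ l, kv.1 ∈ names ∧ x ∈ kv.2 := by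
  induction l generalizing c with
  | nil => simp
  | cons kv kvs ih =>
    simp only [List.foldl_cons, ih]
    split_ifs with h <;> simp only [List.mem_append, List.mem_cons] <;> aesop

-- a literal dict's getD, read off its association list (keys pairwise distinct)
theorem pvLookup_mem (k x : String) :
    x ∈ pvLookups.getD k [] ↔ ∃ kv ∈ pvTable, kv.1 = k ∧ x ∈ kv.2 := by
  rw [show pvLookups = PySem.Dict.mk pvTable from by decide]
  simp only [pvTable, PySem.Dict.getD, PySem.Dict.get?_mk_cons, beq_iff_eq]
  split_ifs <;> (try subst_vars) <;> simp_all [PySem.Dict.get?]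

-- A's final set and B's candidate list have the same members
theorem pv_cand_mem (pips us : List String) (x : String) :
    (x ∈ pips.foldl (fun s pipPackage =>
        let s := PySem.Set.update s (pvLookups.getD (pvNorm pipPackage) [])
        if PySem.Str.startswith pipPackage "git+" then PySem.Set.add s "git" else s)
        (PySem.Set.ofList us)) ↔
    (x ∈ (if pips.any (fun p => PySem.Str.startswith p "git+") then
        (pvTable.foldl (fun cand kv =>
          if kv.1 ∈ pips.map (fun p => pvNorm p) then cand ++ kv.2 else cand) us) ++ ["git"]
      else pvTable.foldl (fun cand kv =>
          if kv.1 ∈ pips.map (fun p => pvNorm p) then cand ++ kv.2 else cand) us)) := by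
  rw [pvA_fold_mem]
  have hb := pvB_fold_mem pvTable (pips.map (fun p => pvNorm p)) us x
  have hus : x ∈ PySem.Set.ofList us ↔ x ∈ us := by simp [PySem.Set.mem_ofList]
  constructor
  · rintro (h | ⟨p, hp, hx | ⟨hg, rfl⟩⟩)
    · have : x ∈ pvTable.foldl (fun cand kv =>
          if kv.1 ∈ pips.map (fun p => pvNorm p) then cand ++ kv.2 else cand) us :=
        hb.mpr (Or.inl (hus.mp h))
      split_ifs with hgit
      · exact List.mem_append.mpr (Or.inl this)
      · exact this
    · have : x ∈ pvTable.foldl (fun cand kv =>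
          if kv.1 ∈ pips.map (fun p => pvNorm p) then cand ++ kv.2 else cand) us := by
        obtain ⟨kv, hkv, hk, hx2⟩ := (pvLookup_mem (pvNorm p) x).mp hx
        exact hb.mpr (Or.inr ⟨kv, hkv, List.mem_map.mpr ⟨p, hp, hk.symm⟩, hx2⟩)
      split_ifs with hgit
      · exact List.mem_append.mpr (Or.inl this)
      · exact this
    · have hgit : pips.any (fun p => PySem.Str.startswith p "git+") = true :=
        List.any_eq_true.mpr ⟨p, hp, hg⟩
      rw [if_pos hgit]
      exact List.mem_append.mpr (Or.inr (List.mem_singleton.mpr rfl))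
  · intro h
    have core : x ∈ pvTable.foldl (fun cand kv =>
          if kv.1 ∈ pips.map (fun p => pvNorm p) then cand ++ kv.2 else cand) us →
        x ∈ PySem.Set.ofList us ∨ ∃ p ∈ pips, x ∈ pvLookups.getD (pvNorm p) [] ∨
          (PySem.Str.startswith p "git+" = true ∧ x = "git") := by
      intro hc
      rcases hb.mp hc with h0 | ⟨kv, hkv, hk, hx2⟩
      · exact Or.inl (hus.mpr h0)
      · obtain ⟨p, hp, hpe⟩ := List.mem_map.mp hk
        exact Or.inr ⟨p, hp, Or.inl ((pvLookup_mem (pvNorm p) x).mpr ⟨kv, hkv, by rw [hpe], hx2⟩)⟩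
    split_ifs at h with hgit
    · rcases List.mem_append.mp h with h' | h'
      · exact core h'
      · obtain ⟨p, hp, hg⟩ := List.any_eq_true.mp hgit
        exact Or.inr ⟨p, hp, Or.inr ⟨hg, List.mem_singleton.mp h'⟩⟩
    · exact core h

-- ===== VERDICT =====
theorem systemPackagesForPips_spec : Claim_equal_systemPackagesForPips := by
  intro pipPackages userSysPackages _
  unfold Spec_systemPackagesForPips systemPackagesForPips systemPackagesForPips_alt
  cases pipPackages with
  | none => rfl
  | some pips =>
    simp only []
    set us := userSysPackages.getD [] with hus
    set sa := pips.foldl (fun s pipPackage =>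
        let s := PySem.Set.update s (pvLookups.getD (pvNorm pipPackage) [])
        if PySem.Str.startswith pipPackage "git+" then PySem.Set.add s "git" else s)
        (PySem.Set.ofList us) with hsa
    set cand2 := (if pips.any (fun p => PySem.Str.startswith p "git+") then
        (pvTable.foldl (fun cand kv =>
          if kv.1 ∈ pips.map (fun p => pvNorm p) then cand ++ kv.2 else cand) us) ++ ["git"]
      else pvTable.foldl (fun cand kv =>
          if kv.1 ∈ pips.map (fun p => pvNorm p) then cand ++ kv.2 else cand) us) with hcand2
    have hmm : ∀ x, x ∈ sa ↔ x ∈ cand2 := fun x => pv_cand_mem pips us x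
    set candS := PySem.List.sorted cand2 (fun x => x) false with hcandS
    have hSsorted : candS.Pairwise (· ≤ ·) := PySem.List.sorted_pairwise cand2 (fun x => x)
    have hSmem : ∀ x, x ∈ candS ↔ x ∈ cand2 := fun x => PySem.List.mem_sorted cand2 (fun x => x) false x
    rw [pvFold_eq_dedup, List.nil_append]
    set res := pvDedup candS none with hres
    have hlb : ∀ y ∈ candS, ∀ p, (none : Option String) = some p → p ≤ y := by
      intro y _ p hp; cases hp
    have hresmem : ∀ x, x ∈ res ↔ x ∈ candS := by
      intro x
      rw [hres, mem_pvDedup candS none x hSsorted hlb]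
      simp
    have hrespw : res.Pairwise (· < ·) := (pvDedup_pairwise candS none hSsorted hlb).1
    have hresnd : res.Nodup := hrespw.imp (fun h => ne_of_lt h)
    have hna : sa.Nodup := pvA_fold_nodup _ _ (PySem.Set.nodup_ofList us)
    have hperm : res.Perm sa := by
      rw [List.perm_ext_iff_of_nodup hresnd hna]
      intro x
      rw [hresmem x, hSmem x, hmm x]
    have hsorted_eq : PySem.List.sorted sa (fun x => x) false = res :=
      PySem.List.sorted_eq_of_perm_of_pairwise_lt sa res (fun x => x) hperm hrespw
    have hlen : PySem.Set.len sa = res.length := by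
      simpa [PySem.Set.len] using hperm.length_eq.symm
    by_cases hz : PySem.Set.len sa = 0
    · rw [if_pos hz, if_pos (by
        rw [← List.length_eq_zero_iff]
        have := hlen ▸ hz
        exact_mod_cast this)]
    · rw [if_neg hz, if_neg (by
        intro he
        exact hz (by rw [hlen, he]; rfl)), hsorted_eq]
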